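-- pv_equiv track=rewrite | github.com/topliceanu/learn | python/interview/sliding_window.py | characterReverse
-- ===== SOURCE A (Python) =====
-- def  characterReverse( input):
--     n = len(input)
--     output = ''
--     count_t = 0
--     count_h = 0
--     for i in range(n):
--         a = input[i]
--         if i == n-1:
--             b = None
--         else:
--             b = input[i+1]
--         if a == 't' and b == 't':
--             count_t += 1
--         if a == 't' and b == 'h':
--             count_t += 1
--         if a == 'h' and b == 'h':
--             count_h += 1
--         if a == 'h' and b == 't':
--             count_h += 1
--         if a == 't' and b != 't' and b != 'h':
--             count_t += 1
--         if a == 'h' and b != 't' and b != 'h':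
--             count_h += 1
--         if a != 't' and a != 'h':
--             output += 'h'*count_h + 't'*count_t + a
--             count_h = 0
--             count_t = 0
--     return output
-- ===== SOURCE B (Python) =====
-- def characterReverse(input):
--     # Tokenize into (run of t/h, following delimiter) pairs: for each run,
--     # emit all its h's, then all its t's, then the delimiter. A trailing
--     # t/h run with no following delimiter is dropped (as in A).
--     parts = []
--     i, n = 0, len(input)
--     while i < n:
--         j = i
--         while j < n and input[j] in 'th':
--             j += 1
--         if j == n:
--             break
--         run = input[i:j]
--         parts.append('h' * run.count('h') + 't' * run.count('t') + input[j])
--         i = j + 1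
--     return ''.join(parts)
-- ===== Notes on version B (the rewrite author's own statement) =====
-- stated objective: alternative
-- what changed: Replaces A's char-by-char scan with lookahead and six counter branches by a run tokenizer: split the string into (t/h-run, delimiter) tokens and emit h-count + t-count + delimiter per token.
import Mathlib
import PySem

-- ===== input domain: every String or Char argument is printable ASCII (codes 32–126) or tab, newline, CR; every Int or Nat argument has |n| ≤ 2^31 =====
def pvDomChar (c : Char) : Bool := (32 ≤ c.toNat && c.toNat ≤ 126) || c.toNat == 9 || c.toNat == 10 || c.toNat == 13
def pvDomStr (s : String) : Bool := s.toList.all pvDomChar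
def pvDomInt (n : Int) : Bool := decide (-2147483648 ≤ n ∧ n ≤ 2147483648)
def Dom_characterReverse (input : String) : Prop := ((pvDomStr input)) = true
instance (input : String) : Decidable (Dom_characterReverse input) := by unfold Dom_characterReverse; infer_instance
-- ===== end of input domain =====

-- B replaces A's char-by-char counter scan with a run tokenizer (t/h-run, delimiter) pairs; return values proved equal on all strings.

-- ===== PORT A =====
-- one iteration of A's for-loop body; state = (output, count_t, count_h)
def stepA (cs : List Char) (n : Nat) (st : List Char × Nat × Nat) (i : Nat) : List Char × Nat × Nat :=
  let (output, count_t, count_h) := st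
  let a := cs.getD i ' '
  let b : Option Char := if i == n - 1 then none else some (cs.getD (i + 1) ' ')
  let count_t := if a == 't' && b == some 't' then count_t + 1 else count_t
  let count_t := if a == 't' && b == some 'h' then count_t + 1 else count_t
  let count_h := if a == 'h' && b == some 'h' then count_h + 1 else count_h
  let count_h := if a == 'h' && b == some 't' then count_h + 1 else count_h
  let count_t := if a == 't' && b != some 't' && b != some 'h' then count_t + 1 else count_t
  let count_h := if a == 'h' && b != some 't' && b != some 'h' then count_h + 1 else count_h
  if a != 't' && a != 'h' then
    (output ++ List.replicate count_h 'h' ++ List.replicate count_t 't' ++ [a], 0, 0)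
  else
    (output, count_t, count_h)

def characterReverse (input : String) : String :=
  let cs := input.toList
  let n := cs.length
  String.mk ((List.range n).foldl (stepA cs n) ([], 0, 0)).1

-- ===== PORT B =====
def isTH (c : Char) : Bool := c == 't' || c == 'h'

def crAltGo (cs : List Char) : List Char :=
  match h : cs.dropWhile isTH with
  | [] => []
  | d :: tl =>
    let run := cs.takeWhile isTH
    List.replicate (run.count 'h') 'h' ++ List.replicate (run.count 't') 't' ++
      d :: crAltGo tl
termination_by cs.length
decreasing_by
  have h1 : (cs.dropWhile isTH).length ≤ cs.length := List.length_dropWhile_le _ _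
  rw [h] at h1
  simp at h1
  omega

def characterReverse_alt (input : String) : String :=
  String.mk (crAltGo input.toList)

-- ===== PRECONDITION & SPEC =====
def Spec_characterReverse (input : String) (out : String) : Prop := out = characterReverse_alt input
instance (input : String) (out : String) : Decidable (Spec_characterReverse input out) := by unfold Spec_characterReverse; infer_instance

-- ===== CLAIM (what is proved, stated in full; the proofs are below) =====
def Claim_equal_characterReverse : Prop := ∀ (input : String), Dom_characterReverse input → Spec_characterReverse input (characterReverse input)

-- ===== LEMMAS AND PROOFS =====

-- A's loop as a structural recursion on the remaining characters
def auxA : List Char → Nat → Nat → List Char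
  | [], _, _ => []
  | a :: rest, ct, ch =>
    if a = 't' then auxA rest (ct + 1) ch
    else if a = 'h' then auxA rest ct (ch + 1)
    else List.replicate ch 'h' ++ List.replicate ct 't' ++ a :: auxA rest 0 0

-- net effect of one loop iteration: every 't' bumps count_t, every 'h' bumps count_h,
-- any other char flushes; the lookahead b never changes the result
lemma stepA_eq (cs : List Char) (i : Nat) (out : List Char) (ct ch : Nat) :
    stepA cs cs.length (out, ct, ch) i =
      if cs.getD i ' ' = 't' then (out, ct + 1, ch)
      else if cs.getD i ' ' = 'h' then (out, ct, ch + 1)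
      else (out ++ List.replicate ch 'h' ++ List.replicate ct 't' ++ [cs.getD i ' '], 0, 0) := by
  simp only [stepA]
  generalize cs.getD i ' ' = a
  generalize (if (i == cs.length - 1) = true then (none : Option Char)
              else some (cs.getD (i + 1) ' ')) = b
  by_cases ha : a = 't'
  · rcases b with _ | c
    · simp [ha]
    · by_cases hc : c = 't'
      · simp [ha, hc]
      · by_cases hc2 : c = 'h' <;> simp [ha, hc, hc2]
  · by_cases ha2 : a = 'h'
    · rcases b with _ | c
      · simp [ha, ha2]
      · by_cases hc : c = 't'
        · simp [ha, ha2, hc]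
        · by_cases hc2 : c = 'h' <;> simp [ha, ha2, hc, hc2]
    · rcases b with _ | c
      · simp [ha, ha2]
      · by_cases hc : c = 't'
        · simp [ha, ha2, hc]
        · by_cases hc2 : c = 'h' <;> simp [ha, ha2, hc, hc2]

lemma foldA_eq (cs : List Char) :
    ∀ (m k : Nat) (out : List Char) (ct ch : Nat), k + m = cs.length →
      ((List.range' k m).foldl (stepA cs cs.length) (out, ct, ch)).1
        = out ++ auxA (cs.drop k) ct ch := by
  intro m
  induction m with
  | zero =>
    intro k out ct ch hk
    simp [List.drop_eq_nil_of_le (by omega : cs.length ≤ k), auxA]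
  | succ m ih =>
    intro k out ct ch hk
    have hklt : k < cs.length := by omega
    have hdrop : cs.drop k = cs[k] :: cs.drop (k + 1) :=
      (List.getElem_cons_drop hklt).symm
    have hget : cs.getD k ' ' = cs[k] := by
      simp [List.getD_eq_getElem?_getD, List.getElem?_eq_getElem hklt]
    rw [List.range'_succ, List.foldl_cons, stepA_eq, hget, hdrop]
    simp only [auxA]
    by_cases h1 : cs[k] = 't'
    · rw [if_pos h1, if_pos h1, ih (k + 1) out (ct + 1) ch (by omega)]
    · by_cases h2 : cs[k] = 'h'
      · rw [if_neg h1, if_neg h1, if_pos h2, if_pos h2, ih (k + 1) out ct (ch + 1) (by omega)]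
      · rw [if_neg h1, if_neg h1, if_neg h2, if_neg h2, ih (k + 1) _ 0 0 (by omega)]
        simp

lemma characterReverse_eq_auxA (input : String) :
    characterReverse input = String.mk (auxA input.toList 0 0) := by
  show String.mk ((List.range input.toList.length).foldl
      (stepA input.toList input.toList.length) ([], 0, 0)).1 = _
  rw [List.range_eq_range',
    foldA_eq input.toList input.toList.length 0 [] 0 0 (by omega)]
  simp

lemma auxA_eq_go (cs : List Char) (ct ch : Nat) :
    auxA cs ct ch =
      (match cs.dropWhile isTH with
       | [] => []
       | d :: tl =>
         List.replicate (ch + (cs.takeWhile isTH).count 'h') 'h' ++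
         List.replicate (ct + (cs.takeWhile isTH).count 't') 't' ++ d :: crAltGo tl) := by
  induction cs generalizing ct ch with
  | nil => simp [auxA, List.dropWhile]
  | cons a rest ih =>
    by_cases h1 : a = 't'
    · subst h1
      rw [auxA, if_pos rfl, ih]
      simp only [List.dropWhile_cons, List.takeWhile_cons,
        show isTH 't' = true from rfl, if_true]
      rcases rest.dropWhile isTH with _ | ⟨d, tl⟩
      · rfl
      · simp [List.count_cons]
        try omega
    · by_cases h2 : a = 'h'
      · subst h2
        rw [auxA, if_neg (by decide), if_pos rfl, ih]
        simp only [List.dropWhile_cons, List.takeWhile_cons,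
          show isTH 'h' = true from rfl, if_true]
        rcases rest.dropWhile isTH with _ | ⟨d, tl⟩
        · rfl
        · simp [List.count_cons]
          try omega
      · have hth : isTH a = false := by simp [isTH, h1, h2]
        rw [auxA, if_neg h1, if_neg h2]
        simp only [List.dropWhile_cons, List.takeWhile_cons, hth,
          Bool.false_eq_true, if_false]
        have hgo : auxA rest 0 0 = crAltGo rest := by
          rw [ih 0 0, crAltGo]
          rcases h : rest.dropWhile isTH with _ | ⟨d, tl⟩ <;> simp
        simp [hgo]

lemma alt_eq_auxA (input : String) :
    characterReverse_alt input = String.mk (auxA input.toList 0 0) := by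
  unfold characterReverse_alt
  congr 1
  rw [auxA_eq_go, crAltGo]
  rcases h : input.toList.dropWhile isTH with _ | ⟨d, tl⟩ <;> simp

-- ===== VERDICT (by name: the statement is the Claim_ definition above) =====
theorem characterReverse_spec : Claim_equal_characterReverse := by
  intro input _
  unfold Spec_characterReverse
  rw [characterReverse_eq_auxA, alt_eq_auxA]
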